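-- pv_equiv track=rewrite | github.com/Yukun-Huang/Google-KickStart | 2019 Round A/A_py/A_large.py | solution
-- ===== SOURCE A (Python) =====
-- def calc_min_k_init(chooce):
--     min_k = 0
--     max_S = max(chooce)
--     for Si in chooce:
--         min_k += (max_S - Si)
--     first_element = chooce[0]
--     return min_k, max_S, first_element
--
-- def calc_min_k(new_element, min_k, max_S, first_element, P):
--     min_k -= (max_S - first_element)
--     if new_element > max_S:
--         min_k += (P-1) * (new_element - max_S)
--         max_S = new_element
--     elif new_element < max_S:
--         min_k += (max_S - new_element)
--     return min_k, max_S
--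
-- def solution(N, P, S):
--     S = sorted(S)
--     # init
--     min_k, max_S, first_element = calc_min_k_init(S[0:P])
--     answer = min_k
--     # run
--     for p_left in range(1, N - P + 1):
--         new_element = S[p_left+P-1]
--         min_k, max_S = calc_min_k(new_element, min_k, max_S, first_element, P)
--         first_element = S[p_left]
--         if min_k < answer:
--             answer = min_k
--     return answer
-- ===== SOURCE B (Python) =====
-- def solution(N, P, S):
--     T = sorted(S)
--     # prefix sums: pre[k] = sum of the k smallest elements
--     pre = [0]
--     s = 0
--     for x in T:
--         s += x
--         pre.append(s)
--     W = T[0:P]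
--     best = len(W) * W[-1] - pre[len(W)]
--     for i in range(1, N - P + 1):
--         c = P * T[i + P - 1] - (pre[i + P] - pre[i])
--         if c < best:
--             best = c
--     return best
-- ===== Notes on version B (the rewrite author's own statement) =====
-- stated objective: simpler
-- what changed: Replaces A's incremental sliding-window state machine (min_k/max_S/first_element updated via two helper functions) with a prefix-sum table and a direct closed-form cost P*T[i+P-1] - (pre[i+P]-pre[i]) per window, keeping a running minimum.
-- outside the precondition, e.g. on solution(0, -1, [2, 7, 3]): A returns -8, B returns -5; on solution(2, -1, [5, 1, 4]): A raises IndexError, B returns -4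
import Mathlib
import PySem

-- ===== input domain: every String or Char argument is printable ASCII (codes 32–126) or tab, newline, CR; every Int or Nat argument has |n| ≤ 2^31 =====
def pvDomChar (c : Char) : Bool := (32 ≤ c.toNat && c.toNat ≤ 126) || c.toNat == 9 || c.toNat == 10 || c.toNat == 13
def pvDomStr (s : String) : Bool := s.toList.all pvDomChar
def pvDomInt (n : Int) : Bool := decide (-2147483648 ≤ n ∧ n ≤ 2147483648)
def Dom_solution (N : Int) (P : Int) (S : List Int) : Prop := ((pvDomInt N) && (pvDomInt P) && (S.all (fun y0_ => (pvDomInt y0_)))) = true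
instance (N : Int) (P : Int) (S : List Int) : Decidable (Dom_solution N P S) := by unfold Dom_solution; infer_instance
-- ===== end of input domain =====

-- B replaces A's incremental sliding-window state (min_k/max_S/first_element) by a prefix-sum
-- table and a closed-form per-window cost; objective: simpler. Equivalence on Pre_ (natural domain).

-- ===== PORT A =====
def calcMinKInit (chooce : List Int) : Int × Int × Int :=
  match PySem.List.max? chooce (fun x => x) with
  | none => (0, 0, 0)   -- max([]) raises ValueError in Python; excluded by Pre_solution
  | some maxS =>
    let minK := chooce.foldl (fun acc Si => acc + (maxS - Si)) 0
    (minK, maxS, (PySem.List.pyGet? chooce 0).getD 0)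

def calcMinK (newElement minK maxS firstElement P : Int) : Int × Int :=
  let minK := minK - (maxS - firstElement)
  if maxS < newElement then (minK + (P - 1) * (newElement - maxS), newElement)
  else if newElement < maxS then (minK + (maxS - newElement), maxS)
  else (minK, maxS)

def stepA (T : List Int) (P : Int) (st : Int × Int × Int × Int) (pLeft : Int) : Int × Int × Int × Int :=
  let newElement := (PySem.List.pyGet? T (pLeft + P - 1)).getD 0
  let r := calcMinK newElement st.1 st.2.1 st.2.2.1 P
  let firstElement := (PySem.List.pyGet? T pLeft).getD 0
  let answer := if r.1 < st.2.2.2 then r.1 else st.2.2.2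
  (r.1, r.2, firstElement, answer)

def solution (N : Int) (P : Int) (S : List Int) : Int :=
  let T := PySem.List.sorted S (fun x => x) false
  let init := calcMinKInit (PySem.List.slice T (some 0) (some P))
  (((PySem.List.pyRange 1 (N - P + 1) 1).foldl (stepA T P)
      (init.1, init.2.1, init.2.2, init.1)).2.2.2)

-- ===== PORT B =====
def prefixSums (T : List Int) : List Int :=
  (T.foldl (fun (st : List Int × Int) x => (st.1 ++ [st.2 + x], st.2 + x)) ([0], 0)).1

def stepB (T pre : List Int) (P : Int) (best i : Int) : Int :=
  let c := P * (PySem.List.pyGet? T (i + P - 1)).getD 0 -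
    ((PySem.List.pyGet? pre (i + P)).getD 0 - (PySem.List.pyGet? pre i).getD 0)
  if c < best then c else best

def solution_alt (N : Int) (P : Int) (S : List Int) : Int :=
  let T := PySem.List.sorted S (fun x => x) false
  let pre := prefixSums T
  let W := PySem.List.slice T (some 0) (some P)
  let best := (W.length : Int) * (PySem.List.pyGet? W (-1)).getD 0 -
    (PySem.List.pyGet? pre (W.length : Int)).getD 0
  (PySem.List.pyRange 1 (N - P + 1) 1).foldl (stepB T pre P) best

-- ===== PRECONDITION & SPEC =====
-- Pre_ is the natural domain of the problem: window size P ≥ 1, S nonempty, and either no full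
-- sliding (N ≤ P) or N within the list length (N ≤ len S); outside it A raises
-- (ValueError/IndexError) or, for P < 1, slice truncation and negative-index wraparound in A
-- produce accidental values for a nonsensical window size.
def Pre_solution (N : Int) (P : Int) (S : List Int) : Prop :=
  1 ≤ P ∧ 1 ≤ S.length ∧ (N ≤ P ∨ N ≤ (S.length : Int))
instance (N : Int) (P : Int) (S : List Int) : Decidable (Pre_solution N P S) := by
  unfold Pre_solution; infer_instance

def pvWitness_solution : Int × Int × List Int := (3, 2, [1, 2, 3])

def Spec_solution (N : Int) (P : Int) (S : List Int) (out : Int) : Prop := out = solution_alt N P S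
instance (N : Int) (P : Int) (S : List Int) (out : Int) : Decidable (Spec_solution N P S out) := by
  unfold Spec_solution; infer_instance

-- ===== CLAIM (what is proved, stated in full; the proofs are below) =====
def Claim_equal_solution : Prop := ∀ (N : Int) (P : Int) (S : List Int),
  Dom_solution N P S → Pre_solution N P S → Spec_solution N P S (solution N P S)

-- ===== LEMMAS AND PROOFS =====

-- mathematical description of prefixSums
def prefAux (s : Int) : List Int → List Int
  | [] => []
  | x :: t => (s + x) :: prefAux (s + x) t

lemma foldl_prefixSums (T : List Int) (acc : List Int) (s : Int) :
    T.foldl (fun (st : List Int × Int) x => (st.1 ++ [st.2 + x], st.2 + x)) (acc, s)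
      = (acc ++ prefAux s T, s + T.sum) := by
  induction T generalizing acc s with
  | nil => simp [prefAux]
  | cons x t ih => simp [prefAux, ih, add_assoc]

lemma prefixSums_eq (T : List Int) : prefixSums T = 0 :: prefAux 0 T := by
  simp [prefixSums, foldl_prefixSums]

lemma prefAux_getElem? (T : List Int) (s : Int) (k : Nat) (hk : k < T.length) :
    (prefAux s T)[k]? = some (s + (T.take (k + 1)).sum) := by
  induction T generalizing s k with
  | nil => simp at hk
  | cons x t ih =>
    cases k with
    | zero => simp [prefAux]
    | succ k =>
      simp only [prefAux, List.getElem?_cons_succ]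
      rw [ih (s + x) k (by simpa using hk)]
      simp [add_assoc]

-- pre[k] = sum of the k smallest elements, as the port reads it
lemma pre_get (T : List Int) (k : Int) (h0 : 0 ≤ k) (h1 : k ≤ (T.length : Int)) :
    (PySem.List.pyGet? (prefixSums T) k).getD 0 = (T.take k.toNat).sum := by
  rw [prefixSums_eq, PySem.List.pyGet?_of_nonneg _ h0]
  rcases Nat.eq_zero_or_eq_succ_pred k.toNat with h | h
  · rw [h]; simp
  · rw [h, List.getElem?_cons_succ, prefAux_getElem? _ _ _ (by omega)]
    simp [Nat.succ_eq_add_one]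

-- element access shorthand
lemma g_eq (T : List Int) (k : Int) (h0 : 0 ≤ k) (h1 : k < (T.length : Int)) :
    (PySem.List.pyGet? T k).getD 0 = T[k.toNat]'(by omega) := by
  rw [PySem.List.pyGet?_eq_some_getElem T h0 (by exact_mod_cast h1)]
  rfl

lemma pg_succ (T : List Int) (k : Int) (h0 : 0 ≤ k) (h1 : k < (T.length : Int)) :
    (PySem.List.pyGet? (prefixSums T) (k + 1)).getD 0
      = (PySem.List.pyGet? (prefixSums T) k).getD 0 + (PySem.List.pyGet? T k).getD 0 := by
  rw [pre_get T (k + 1) (by omega) (by omega), pre_get T k h0 (by omega),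
      g_eq T k h0 h1]
  have hk1 : (k + 1).toNat = k.toNat + 1 := by omega
  rw [hk1, List.take_add_one, List.sum_append]
  have hlt : k.toNat < T.length := by omega
  simp [List.getElem?_eq_getElem hlt]

-- the cost of the window starting at index i, exactly as stepB computes it
def cost (T : List Int) (P : Int) (i : Int) : Int :=
  P * (PySem.List.pyGet? T (i + P - 1)).getD 0 -
    ((PySem.List.pyGet? (prefixSums T) (i + P)).getD 0 -
     (PySem.List.pyGet? (prefixSums T) i).getD 0)

lemma stepB_eq (T : List Int) (P best i : Int) :
    stepB T (prefixSums T) P best i = if cost T P i < best then cost T P i else best := rfl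

lemma pairwise_getElem_le (T : List Int) (hpair : T.Pairwise (· ≤ ·))
    (p q : Nat) (hpq : p ≤ q) (hq : q < T.length) : T[p]'(by omega) ≤ T[q] := by
  rcases Nat.lt_or_ge p q with h | h
  · exact (List.pairwise_iff_getElem.mp hpair) p q (by omega) hq h
  · have : p = q := by omega
    subst this; exact le_refl _

-- A's incremental update, rewritten against the closed-form costs
lemma cost_step (T : List Int) (P j : Int) (hP : 1 ≤ P) (hj : 1 ≤ j)
    (hub : j + P ≤ (T.length : Int)) :
    cost T P j = cost T P (j - 1)
      - ((PySem.List.pyGet? T (j + P - 2)).getD 0 - (PySem.List.pyGet? T (j - 1)).getD 0)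
      + (P - 1) * ((PySem.List.pyGet? T (j + P - 1)).getD 0
                   - (PySem.List.pyGet? T (j + P - 2)).getD 0) := by
  have h1 : (PySem.List.pyGet? (prefixSums T) (j + P)).getD 0
      = (PySem.List.pyGet? (prefixSums T) (j + P - 1)).getD 0
        + (PySem.List.pyGet? T (j + P - 1)).getD 0 := by
    have := pg_succ T (j + P - 1) (by omega) (by omega)
    have he : j + P - 1 + 1 = j + P := by ring
    rwa [he] at this
  have h2 : (PySem.List.pyGet? (prefixSums T) j).getD 0
      = (PySem.List.pyGet? (prefixSums T) (j - 1)).getD 0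
        + (PySem.List.pyGet? T (j - 1)).getD 0 := by
    have := pg_succ T (j - 1) (by omega) (by omega)
    have he : j - 1 + 1 = j := by ring
    rwa [he] at this
  have e1 : j - 1 + P - 1 = j + P - 2 := by ring
  have e2 : j - 1 + P = j + P - 1 := by ring
  unfold cost
  rw [h1, h2, e1, e2]
  ring

lemma calcMinK_eq (T : List Int) (P j : Int) (hP : 1 ≤ P) (hj : 1 ≤ j)
    (hpair : T.Pairwise (· ≤ ·)) (hub : j + P ≤ (T.length : Int)) :
    calcMinK ((PySem.List.pyGet? T (j + P - 1)).getD 0) (cost T P (j - 1))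
        ((PySem.List.pyGet? T (j + P - 2)).getD 0) ((PySem.List.pyGet? T (j - 1)).getD 0) P
      = (cost T P j, (PySem.List.pyGet? T (j + P - 1)).getD 0) := by
  have hmono : (PySem.List.pyGet? T (j + P - 2)).getD 0
      ≤ (PySem.List.pyGet? T (j + P - 1)).getD 0 := by
    rw [g_eq T (j + P - 2) (by omega) (by omega), g_eq T (j + P - 1) (by omega) (by omega)]
    exact pairwise_getElem_le T hpair _ _ (by omega) (by omega)
  have hc := cost_step T P j hP hj hub
  unfold calcMinK
  rcases lt_or_eq_of_le hmono with h | h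
  · simp only [if_pos h, Prod.mk.injEq, and_true]
    rw [hc]
  · rw [h]
    simp only [lt_irrefl, if_false, Prod.mk.injEq, and_true]
    rw [hc, h]
    ring
  -- both live branches of A's update agree with the closed form; 'new < max' cannot occur on a sorted list

-- main loop invariant: A's fold over [j, j+n) with the invariant state equals B's fold
lemma loop_eq (T : List Int) (P : Int) (hP : 1 ≤ P) (hpair : T.Pairwise (· ≤ ·)) :
    ∀ (n : Nat) (j ans : Int), 1 ≤ j → j + (n : Int) + P - 1 ≤ (T.length : Int) →
    ((PySem.List.pyRange j (j + (n : Int)) 1).foldl (stepA T P)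
        (cost T P (j - 1), (PySem.List.pyGet? T (j + P - 2)).getD 0,
         (PySem.List.pyGet? T (j - 1)).getD 0, ans)).2.2.2
      = (PySem.List.pyRange j (j + (n : Int)) 1).foldl (stepB T (prefixSums T) P) ans := by
  intro n
  induction n with
  | zero =>
    intro j ans hj hub
    simp [PySem.List.pyRange_one_eq_nil (le_refl j)]
  | succ n ih =>
    intro j ans hj hub
    rw [PySem.List.pyRange_one_cons (by push_cast; omega)]
    simp only [List.foldl_cons]
    have hstepA : stepA T P (cost T P (j - 1), (PySem.List.pyGet? T (j + P - 2)).getD 0,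
        (PySem.List.pyGet? T (j - 1)).getD 0, ans) j
        = (cost T P j, (PySem.List.pyGet? T (j + P - 1)).getD 0,
           (PySem.List.pyGet? T j).getD 0,
           if cost T P j < ans then cost T P j else ans) := by
      simp only [stepA]
      rw [calcMinK_eq T P j hP hj hpair (by push_cast at hub ⊢; omega)]
    rw [hstepA, stepB_eq]
    have he : j + ((n + 1 : Nat) : Int) = (j + 1) + (n : Int) := by push_cast; ring
    have e3 : cost T P j = cost T P ((j + 1) - 1) := by norm_num
    have e1 : j + P - 1 = (j + 1) + P - 2 := by ring
    have e2 : (PySem.List.pyGet? T j).getD 0 = (PySem.List.pyGet? T ((j + 1) - 1)).getD 0 := by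
      norm_num
    rw [he, e3, e1, e2]
    exact ih (j + 1) _ (by omega) (by push_cast at hub ⊢; omega)

-- sum of (max - x) over a list, as A's init folds it
lemma foldl_sub_sum (m : Int) : ∀ (W : List Int) (acc : Int),
    W.foldl (fun a Si => a + (m - Si)) acc = acc + (W.length : Int) * m - W.sum := by
  intro W
  induction W with
  | nil => intro acc; simp
  | cons x t ih =>
    intro acc
    simp only [List.foldl_cons, ih, List.length_cons, List.sum_cons]
    push_cast; ring

-- on a sorted nonempty list, Python's max is the last element
lemma max_sorted_getLast (W : List Int) (hW : W ≠ []) (hpair : W.Pairwise (· ≤ ·)) :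
    PySem.List.max? W (fun x => x) = some (W.getLast hW) := by
  obtain ⟨m, hm⟩ : ∃ m, PySem.List.max? W (fun x => x) = some m := by
    cases h : PySem.List.max? W (fun x => x) with
    | none => exact absurd ((PySem.List.max?_eq_none_iff W (fun x => x)).mp h) hW
    | some m => exact ⟨m, rfl⟩
  have hmem := PySem.List.max?_mem hm
  have hmax := PySem.List.max?_isMax hm
  have hlast_mem := List.getLast_mem hW
  have hle1 : m ≤ W.getLast hW := by
    obtain ⟨p, hp, hpe⟩ := List.getElem_of_mem hmem
    rw [List.getLast_eq_getElem, ← hpe]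
    exact pairwise_getElem_le W hpair p (W.length - 1) (by omega) (by omega)
  exact hm.trans (by rw [le_antisymm hle1 (hmax _ hlast_mem)])

-- ===== VERDICT (by name: the statement is the Claim_ definition above) =====
theorem solution_spec : Claim_equal_solution := by
  intro N P S _ hPre
  obtain ⟨hP, hL, hNP⟩ := hPre
  simp only [Spec_solution, solution, solution_alt]
  set T := PySem.List.sorted S (fun x => x) false with hT
  have hTlen : T.length = S.length := PySem.List.length_sorted ..
  have hpair : T.Pairwise (· ≤ ·) := PySem.List.sorted_pairwise ..
  -- the first window
  have hW : PySem.List.slice T (some 0) (some P) = T.take P.toNat := by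
    rw [PySem.List.slice_zero_start, PySem.List.slice_to _ (by omega)]
  rw [hW]
  set W := T.take P.toNat with hWdef
  have hWlen : W.length = min P.toNat T.length := by simp [hWdef]
  have hWne : W ≠ [] := by
    have : 0 < W.length := by rw [hWlen]; omega
    exact List.ne_nil_of_length_pos this
  have hWlenle : W.length ≤ T.length := by rw [hWlen]; omega
  have hWsub : T.take W.length = W := by
    rw [hWlen, hWdef]
    rcases le_total P.toNat T.length with h | h
    · rw [min_eq_left h]
    · rw [min_eq_right h, List.take_of_length_le h, List.take_of_length_le le_rfl]
  -- A's init
  have hmax := max_sorted_getLast W hWne (hpair.sublist (List.take_sublist _ _))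
  set m := W.getLast hWne with hm
  have hinit : calcMinKInit W = ((W.length : Int) * m - W.sum, m, (PySem.List.pyGet? W 0).getD 0) := by
    unfold calcMinKInit
    rw [hmax]
    simp only [foldl_sub_sum, zero_add]
  -- B's init value equals A's init min_k
  have hbest : (W.length : Int) * (PySem.List.pyGet? W (-1)).getD 0 -
      (PySem.List.pyGet? (prefixSums T) (W.length : Int)).getD 0
      = (W.length : Int) * m - W.sum := by
    rw [PySem.List.pyGet?_neg_one, List.getLast?_eq_some_getLast hWne, ← hm]
    rw [pre_get T _ (by omega) (by exact_mod_cast hWlenle)]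
    rw [Int.toNat_natCast, hWsub]
    rfl
  rw [hinit, hbest]
  dsimp only
  -- the loop
  by_cases hloop : N - P + 1 ≤ 1
  · rw [PySem.List.pyRange_one_eq_nil hloop]
    rfl
  · -- nonempty loop: N > P, hence N ≤ len S
    rw [not_le] at hloop
    have hNlen : N ≤ (T.length : Int) := by
      rw [hTlen]; rcases hNP with h | h; omega; exact h
    have hPlen : P < (T.length : Int) := by omega
    have hWlenP : W.length = P.toNat := by rw [hWlen]; omega
    have hWpos : 0 < W.length := List.length_pos_of_ne_nil hWne
    have hWT : ∀ (k : Nat) (hk : k < W.length), W[k] = T[k]'(by omega) := by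
      intro k hk
      exact List.getElem_take
    have hlast : T[W.length - 1]'(by omega) = m := by
      rw [hm, List.getLast_eq_getElem]
      exact (hWT (W.length - 1) (by omega)).symm
    -- the initial state satisfies the loop invariant at j = 1
    have hm_eq : m = (PySem.List.pyGet? T (1 + P - 2)).getD 0 := by
      rw [g_eq T _ (by omega) (by omega)]
      have h1 : (1 + P - 2).toNat = W.length - 1 := by rw [hWlenP]; omega
      simp only [h1]
      exact hlast.symm
    have hfirst : (PySem.List.pyGet? W 0).getD 0 = (PySem.List.pyGet? T (1 - 1)).getD 0 := by
      norm_num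
      rw [g_eq W 0 (by omega) (by omega), g_eq T 0 (by omega) (by omega)]
      simpa using hWT 0 hWpos
    have hmk : (W.length : Int) * m - W.sum = cost T P (1 - 1) := by
      rw [show (1 : Int) - 1 = 0 from by norm_num]
      unfold cost
      rw [show (0 : Int) + P - 1 = P - 1 from by ring, show (0 : Int) + P = P from by ring]
      rw [pre_get T P (by omega) (by omega), pre_get T 0 (by omega) (by omega)]
      rw [g_eq T _ (by omega) (by omega)]
      have h1 : (P - 1).toNat = W.length - 1 := by rw [hWlenP]; omega
      simp only [h1, hlast]
      rw [← hWdef]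
      have h3 : ((W.length : Int)) = P := by rw [hWlenP]; omega
      rw [h3]
      simp
    have hb : N - P + 1 = 1 + ((N - P).toNat : Int) := by omega
    rw [hb, hmk, hm_eq, hfirst]
    exact loop_eq T P hP hpair (N - P).toNat 1 _ (by omega) (by omega)
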